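-- pv_equiv track=rewrite | github.com/Dawars/disk | colmap/colmap2dataset.py | encode_pairs
-- ===== SOURCE A (Python) =====
-- def encode_pairs(pairs):
--     '''
--     "Encodes" the list of pairs, coming as a list of file names such as
--     [
--         ['file_name_1.jpg', 'file_name_5.jpg'],
--         ['file_name_1.jpg', 'file_name_13.jpg'],
--         ...
--     ]
--     by assigning each filename a unique numeric ID and returning
--     1) a list `id2name` such that id2name[i] is the filename of the i-th image
--     2) a list of lists of the same structure as the input argument, except
--        using file IDs instead of full (string) names
--     '''
--     curr_id = 0
--     name2id = {}
--     id2name = []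
--
--     for pair in pairs:
--         for name in pair:
--             if name in name2id:
--                 continue
--             else:
--                 name2id[name] = curr_id
--                 id2name.append(name)
--                 curr_id += 1
--
--     pairs_as_ixs = []
--     for pair in pairs:
--         pair = [name2id[n] for n in pair]
--         pairs_as_ixs.append(pair)
--
--     return id2name, pairs_as_ixs
-- ===== SOURCE B (Python) =====
-- def encode_pairs(pairs):
--     '''Single fused pass: build the name->id map, the id2name list and the
--     encoded output together while walking the pairs once.'''
--     name2id = {}
--     id2name = []
--     pairs_as_ixs = []
--     for pair in pairs:
--         enc = []
--         for name in pair: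
--             if name not in name2id:
--                 name2id[name] = len(id2name)
--                 id2name.append(name)
--             enc.append(name2id[name])
--         pairs_as_ixs.append(enc)
--     return id2name, pairs_as_ixs
-- ===== Notes on version B (the rewrite author's own statement) =====
-- stated objective: simpler
-- what changed: Replaces A's two sequential passes (first build the name->id index over all pairs, then a second full traversal re-encoding each pair via dict lookups) by one fused pass that assigns ids via len(id2name) and emits each encoded pair while first seeing it.
import Mathlib
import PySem

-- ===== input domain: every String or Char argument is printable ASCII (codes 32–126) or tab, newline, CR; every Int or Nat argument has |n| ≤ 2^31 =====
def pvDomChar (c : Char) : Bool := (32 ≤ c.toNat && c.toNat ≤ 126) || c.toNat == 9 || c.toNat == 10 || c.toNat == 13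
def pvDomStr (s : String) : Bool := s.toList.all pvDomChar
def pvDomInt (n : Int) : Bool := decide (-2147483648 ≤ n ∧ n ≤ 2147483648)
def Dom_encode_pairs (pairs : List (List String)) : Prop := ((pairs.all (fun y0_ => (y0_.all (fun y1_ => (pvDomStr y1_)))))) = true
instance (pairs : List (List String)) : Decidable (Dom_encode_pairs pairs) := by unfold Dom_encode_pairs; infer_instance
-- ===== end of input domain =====

-- B fuses A's two passes (index building, then re-encoding) into one pass that
-- assigns ids via the current length of id2name and emits each encoded pair as it goes
-- (objective: simpler, same return value; neither version mutates its argument).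


-- ===== PORT A =====
-- inner step of A's first loop: state = (curr_id, name2id, id2name)
def stA (st : Int × PySem.Dict String Int × List String) (name : String) :
    Int × PySem.Dict String Int × List String :=
  if st.2.1.contains name then st
  else (st.1 + 1, st.2.1.insert name st.1, st.2.2 ++ [name])

def encode_pairs (pairs : List (List String)) : List String × List (List Int) :=
  -- first loop: build curr_id / name2id / id2name
  let st := pairs.foldl (fun st pair => pair.foldl stA st) (0, PySem.Dict.empty, [])
  -- second loop: re-encode each pair; `name2id[n]`'s key is always present, so getD is exact
  let ixs := pairs.foldl (fun acc pair => acc ++ [pair.map (fun n => st.2.1.getD n 0)]) []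
  (st.2.2, ixs)

-- ===== PORT B =====
-- inner step of B's single loop over one pair: state = (name2id, id2name, enc)
def stB (st : PySem.Dict String Int × List String × List Int) (name : String) :
    PySem.Dict String Int × List String × List Int :=
  let st' := if st.1.contains name then st
             else (st.1.insert name (st.2.1.length : Int), st.2.1 ++ [name], st.2.2)
  -- `enc.append(name2id[name])`: the key is present here, so getD is exact
  (st'.1, st'.2.1, st'.2.2 ++ [st'.1.getD name 0])

-- B's outer step: process one pair, append its encoding
def pairB (st : PySem.Dict String Int × List String × List (List Int)) (pair : List String) :
    PySem.Dict String Int × List String × List (List Int) :=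
  let r := pair.foldl stB (st.1, st.2.1, [])
  (r.1, r.2.1, st.2.2 ++ [r.2.2])

def encode_pairs_alt (pairs : List (List String)) : List String × List (List Int) :=
  let st := pairs.foldl pairB (PySem.Dict.empty, [], [])
  (st.2.1, st.2.2)

-- ===== PRECONDITION & SPEC =====
def Spec_encode_pairs (pairs : List (List String)) (out : List String × List (List Int)) : Prop := out = encode_pairs_alt pairs
instance (pairs : List (List String)) (out : List String × List (List Int)) : Decidable (Spec_encode_pairs pairs out) := by unfold Spec_encode_pairs; infer_instance

-- ===== CLAIM (what is proved, stated in full; the proofs are below) =====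
def Claim_equal_encode_pairs : Prop := ∀ (pairs : List (List String)), Dom_encode_pairs pairs → Spec_encode_pairs pairs (encode_pairs pairs)

-- ===== LEMMAS AND PROOFS =====

-- d' extends d: every binding of d is still looked up in d'
def DExt (d d' : PySem.Dict String Int) : Prop := ∀ k v, d.get? k = some v → d'.get? k = some v

theorem DExt.trans {d₁ d₂ d₃ : PySem.Dict String Int} (h₁ : DExt d₁ d₂) (h₂ : DExt d₂ d₃) : DExt d₁ d₃ :=
  fun k v h => h₂ k v (h₁ k v h)

theorem DExt.insert_fresh (d : PySem.Dict String Int) (k : String) (v : Int)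
    (hk : d.contains k = false) : DExt d (d.insert k v) := by
  intro k' v' h
  have hne : k' ≠ k := by
    intro he; subst he
    rw [PySem.Dict.contains_eq_isSome_get?, h] at hk; simp at hk
  rw [PySem.Dict.get?_insert_of_ne _ _ hne]; exact h

-- inner sync: running A's first-loop body and B's body over one pair from synced states
theorem inner_sync (pair : List String) (d : PySem.Dict String Int) (l : List String) (enc : List Int) :
    pair.foldl stA ((l.length : Int), d, l)
      = (((pair.foldl stB (d, l, enc)).2.1.length : Int),
         (pair.foldl stB (d, l, enc)).1, (pair.foldl stB (d, l, enc)).2.1)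
    ∧ DExt d (pair.foldl stB (d, l, enc)).1
    ∧ (∀ D : PySem.Dict String Int, DExt (pair.foldl stB (d, l, enc)).1 D →
        (pair.foldl stB (d, l, enc)).2.2 = enc ++ pair.map (fun n => D.getD n 0)) := by
  induction pair generalizing d l enc with
  | nil => exact ⟨rfl, fun _ _ h => h, fun D _ => by simp⟩
  | cons name rest ih =>
    by_cases hc : d.contains name = true
    · obtain ⟨v, hv⟩ : ∃ v, d.get? name = some v := by
        rw [PySem.Dict.contains_eq_isSome_get?] at hc
        exact Option.isSome_iff_exists.mp hc
      have hstA : stA ((l.length : Int), d, l) name = ((l.length : Int), d, l) := by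
        simp [stA, hc]
      have hstB : stB (d, l, enc) name = (d, l, enc ++ [d.getD name 0]) := by
        simp [stB, hc]
      obtain ⟨ha, hext, henc⟩ := ih d l (enc ++ [d.getD name 0])
      refine ⟨by simpa [List.foldl_cons, hstA, hstB] using ha,
              by simpa [List.foldl_cons, hstB] using hext,
              fun D hD => ?_⟩
      have hvD : D.get? name = some v := hD name v (by
        simpa [List.foldl_cons, hstB] using hext name v hv)
      have : d.getD name 0 = D.getD name 0 := by
        rw [PySem.Dict.getD_eq_get?_getD, PySem.Dict.getD_eq_get?_getD, hv, hvD]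
      simpa [List.foldl_cons, hstB, this] using henc D (by simpa [List.foldl_cons, hstB] using hD)
    · have hc' : d.contains name = false := by simpa using hc
      have hstA : stA ((l.length : Int), d, l) name
          = (((l ++ [name]).length : Int), d.insert name (l.length : Int), l ++ [name]) := by
        simp [stA, hc']
      have hstB : stB (d, l, enc) name
          = (d.insert name (l.length : Int), l ++ [name], enc ++ [(l.length : Int)]) := by
        simp [stB, hc', PySem.Dict.getD_insert_self]
      obtain ⟨ha, hext, henc⟩ := ih (d.insert name (l.length : Int)) (l ++ [name]) (enc ++ [(l.length : Int)])
      have hext0 : DExt d (rest.foldl stB (d.insert name (l.length : Int), l ++ [name], enc ++ [(l.length : Int)])).1 :=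
        (DExt.insert_fresh d name (l.length : Int) hc').trans hext
      refine ⟨by simpa [List.foldl_cons, hstA, hstB] using ha,
              by simpa [List.foldl_cons, hstB] using hext0,
              fun D hD => ?_⟩
      have hD' := henc D (by simpa [List.foldl_cons, hstB] using hD)
      have hvD : D.get? name = some (l.length : Int) :=
        hD name _ (by
          simpa [List.foldl_cons, hstB] using hext name _ (PySem.Dict.get?_insert_self d _ _))
      have hval : D.getD name 0 = (l.length : Int) := by
        rw [PySem.Dict.getD_eq_get?_getD, hvD]; rfl
      simp only [List.foldl_cons, hstB] at hD' ⊢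
      simp [hD', hval]

-- outer sync: running both outer loops from synced states
theorem outer_sync (pairs : List (List String)) (d : PySem.Dict String Int)
    (l : List String) (out : List (List Int)) :
    pairs.foldl (fun st pair => pair.foldl stA st) ((l.length : Int), d, l)
      = (((pairs.foldl pairB (d, l, out)).2.1.length : Int),
         (pairs.foldl pairB (d, l, out)).1, (pairs.foldl pairB (d, l, out)).2.1)
    ∧ DExt d (pairs.foldl pairB (d, l, out)).1
    ∧ (pairs.foldl pairB (d, l, out)).2.2
        = out ++ pairs.map (fun pair => pair.map (fun n => (pairs.foldl pairB (d, l, out)).1.getD n 0)) := by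
  induction pairs generalizing d l out with
  | nil => exact ⟨rfl, fun _ _ h => h, by simp⟩
  | cons pair rest ih =>
    obtain ⟨hia, hiext, hienc⟩ := inner_sync pair d l []
    set r := pair.foldl stB (d, l, []) with hr
    have hpB : pairB (d, l, out) pair = (r.1, r.2.1, out ++ [r.2.2]) := rfl
    obtain ⟨ha, hext, henc⟩ := ih r.1 r.2.1 (out ++ [r.2.2])
    set F := (rest.foldl pairB (r.1, r.2.1, out ++ [r.2.2])) with hF
    have hextF : DExt d F.1 := hiext.trans hext
    have hencPair : r.2.2 = pair.map (fun n => F.1.getD n 0) := by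
      simpa using hienc F.1 hext
    refine ⟨?_, ?_, ?_⟩
    · simp only [List.foldl_cons, hpB, hia, ← hF]
      exact ha
    · simpa [List.foldl_cons, hpB, ← hF] using hextF
    · simp only [List.foldl_cons, hpB, ← hF] at henc ⊢
      rw [henc, hencPair]
      simp

-- ===== VERDICT (by name: the statement is the Claim_ definition above) =====
theorem encode_pairs_spec : Claim_equal_encode_pairs := by
  intro pairs _
  obtain ⟨ha, _, henc⟩ := outer_sync pairs PySem.Dict.empty [] []
  have ha0 : pairs.foldl (fun st pair => pair.foldl stA st) ((0 : Int), PySem.Dict.empty, [])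
      = (((pairs.foldl pairB (PySem.Dict.empty, [], [])).2.1.length : Int),
         (pairs.foldl pairB (PySem.Dict.empty, [], [])).1,
         (pairs.foldl pairB (PySem.Dict.empty, [], [])).2.1) := by simpa using ha
  simp only [Spec_encode_pairs, encode_pairs, encode_pairs_alt, ha0,
    PySem.List.foldl_append_singleton_eq_map]
  rw [henc]
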